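-- pv_equiv track=rewrite | github.com/nntcao/Programming-Languages---Assignment-1 | setops.py | add_space_between_letters_and_numbers
-- ===== SOURCE A (Python) =====
-- is_sorted_asc = lambda sorted_list : True if len(sorted_list) <= 1 else (False if sorted_list[0] > sorted_list[1] else is_sorted_asc(sorted_list[1:]))
--
-- _binary_search_helper = lambda sorted_list, element : False if not sorted_list else (True if sorted_list[len(sorted_list) // 2] == element else (_binary_search_helper(sorted_list[len(sorted_list) // 2 + 1:], element) if sorted_list[len(sorted_list) // 2] < element else _binary_search_helper(sorted_list[:len(sorted_list) // 2], element)))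
--
-- def binary_search(sorted_list: list[any], element: any):
--     """Completes a binary search for the element
--
--     Args:
--         l (list[any]): a sorted list to search
--         element (any): the element to search for
--
--     Returns:
--         bool: True if the element is found, False otherwise
--     """
--     if not is_sorted_asc(sorted_list):
--         raise ValueError("list must be sorted to call binary search function")
--     return _binary_search_helper(sorted_list, element)
--
-- def is_alpha(string: str):
--     """Checks if character is an alphabetical character
--
--     Args:
--         string (str): character to check
--
--     Returns:
--         bool: True/False if numeric
--     """
--     if len(string) != 1:
--         return False
--     return binary_search("ABCDEFGHIJKLMNOPQRSTUVWXYZabcdefghijklmnopqrstuvwxyz", string)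
--
-- def is_numeric(string: str):
--     """Checks if character is numeric
--
--     Args:
--         string (str): character to check
--
--     Returns:
--         bool: True/False if numeric
--     """
--     if len(string) != 1:
--         return False
--     return binary_search("0123456789", string)
--
-- def add_space_between_letters_and_numbers(string: str):
--     """Adds a space between a letter and a number
--
--     Args:
--         string (str): string to add spaces to
--
--     Returns:
--         str: string with spaces in between letters and numbers
--     """
--
--     if not string:
--         return ""
--     if len(string) < 2:
--         return string
--     if (is_alpha(string[0]) and is_numeric(string[1])) or (is_numeric(string[0]) and is_alpha(string[1])):
--         return string[0] + " " + add_space_between_letters_and_numbers(string[1:])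
--     return string[0] + add_space_between_letters_and_numbers(string[1:])
-- ===== SOURCE B (Python) =====
-- def add_space_between_letters_and_numbers(string: str):
--     """Adds a space between a letter and a number (single pairwise pass)."""
--     if not string:
--         return ""
--
--     def _boundary(a, b):
--         a_letter = ('A' <= a <= 'Z') or ('a' <= a <= 'z')
--         b_letter = ('A' <= b <= 'Z') or ('a' <= b <= 'z')
--         a_digit = '0' <= a <= '9'
--         b_digit = '0' <= b <= '9'
--         return (a_letter and b_digit) or (a_digit and b_letter)
--
--     return string[0] + ''.join(
--         (' ' + c if _boundary(p, c) else c) for p, c in zip(string, string[1:])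
--     )
-- ===== Notes on version B (the rewrite author's own statement) =====
-- stated objective: faster
-- what changed: Replaces A's per-character recursion (which slices the string at every step and checks each character by a slicing binary search over sorted alphabet strings) with a single pairwise pass over zip(string, string[1:]) using range comparisons for the letter/digit tests.
import Mathlib
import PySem

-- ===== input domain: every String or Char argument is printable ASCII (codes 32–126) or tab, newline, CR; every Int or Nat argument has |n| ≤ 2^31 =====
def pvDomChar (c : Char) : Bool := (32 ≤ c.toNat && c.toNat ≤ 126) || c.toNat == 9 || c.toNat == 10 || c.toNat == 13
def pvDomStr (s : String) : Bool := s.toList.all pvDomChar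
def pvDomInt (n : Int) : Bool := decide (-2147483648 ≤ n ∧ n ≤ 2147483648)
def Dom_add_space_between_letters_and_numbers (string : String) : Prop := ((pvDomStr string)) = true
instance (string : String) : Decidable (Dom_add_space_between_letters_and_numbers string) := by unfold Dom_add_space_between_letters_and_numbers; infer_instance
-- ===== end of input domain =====

-- B replaces A's recursive scan with quadratic binary-search character tests by a
-- single pairwise pass over adjacent characters using range comparisons (objective: simpler).

-- ===== PORT A =====
-- is_sorted_asc (lambda, recursion on the tail slice)
def pvIsSortedAsc (l : List Char) : Bool :=
  match l with
  | [] => true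
  | [_] => true
  | a :: b :: t => if a > b then false else pvIsSortedAsc (b :: t)

-- _binary_search_helper; l[m], l[m+1:], l[:m] with m = len//2 >= 0, so the slices are
-- exactly List.drop/take and the index is in range (l nonempty) -- exact there. The fuel
-- parameter only makes the recursion structural (kernel-reducible): every recursive call
-- is on a strictly shorter list, so with fuel >= length the 0-fuel branch coincides with
-- the empty-list branch and never decides the result.
def pvBinarySearchHelper (fuel : Nat) (l : List Char) (e : Char) : Bool :=
  match fuel with
  | 0 => false
  | fuel + 1 =>
    match l with
    | [] => false
    | _ :: _ =>
      let m := l.length / 2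
      let c := l.getD m ' '   -- in range: m < l.length since l is nonempty
      if c = e then true
      else if c < e then pvBinarySearchHelper fuel (l.drop (m + 1)) e
      else pvBinarySearchHelper fuel (l.take m) e

-- binary_search: raises ValueError when the list is not sorted → none there
def pvBinarySearch? (l : List Char) (e : Char) : Option Bool :=
  if pvIsSortedAsc l then some (pvBinarySearchHelper l.length l e) else none

-- is_alpha / is_numeric: A calls them on 1-character strings (string[0], string[1]),
-- so the len != 1 guard never fires and the argument is the single character; the
-- binary_search argument is a sorted literal, so the ValueError branch (none) is
-- unreachable and getD false is exact.
def pvAlphaChars : List Char := "ABCDEFGHIJKLMNOPQRSTUVWXYZabcdefghijklmnopqrstuvwxyz".toList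
def pvNumericChars : List Char := "0123456789".toList

def pvIsAlphaA (c : Char) : Bool := (pvBinarySearch? pvAlphaChars c).getD false
def pvIsNumericA (c : Char) : Bool := (pvBinarySearch? pvNumericChars c).getD false

def pvAddSpaceA (l : List Char) : List Char :=
  match l with
  | [] => []                -- if not string: return ""
  | [c] => [c]              -- if len(string) < 2: return string
  | a :: b :: t =>
    if (pvIsAlphaA a && pvIsNumericA b) || (pvIsNumericA a && pvIsAlphaA b) then
      a :: ' ' :: pvAddSpaceA (b :: t)
    else
      a :: pvAddSpaceA (b :: t)

def add_space_between_letters_and_numbers (string : String) : String :=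
  String.mk (pvAddSpaceA string.toList)

-- ===== PORT B =====
def pvBoundaryB (a b : Char) : Bool :=
  let aL := ('A' ≤ a && a ≤ 'Z') || ('a' ≤ a && a ≤ 'z')
  let bL := ('A' ≤ b && b ≤ 'Z') || ('a' ≤ b && b ≤ 'z')
  let aD := ('0' ≤ a && a ≤ '9')
  let bD := ('0' ≤ b && b ≤ '9')
  (aL && bD) || (aD && bL)

-- string[0] + ''.join(' ' + c if boundary(p, c) else c for p, c in zip(string, string[1:]))
def add_space_between_letters_and_numbers_alt (string : String) : String :=
  match string.toList with
  | [] => ""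
  | c :: rest =>
    String.mk (c :: (List.zip (c :: rest) rest).flatMap
      (fun pc => if pvBoundaryB pc.1 pc.2 then [' ', pc.2] else [pc.2]))

-- ===== PRECONDITION & SPEC =====
def Spec_add_space_between_letters_and_numbers (string : String) (out : String) : Prop := out = add_space_between_letters_and_numbers_alt string
instance (string : String) (out : String) : Decidable (Spec_add_space_between_letters_and_numbers string out) := by unfold Spec_add_space_between_letters_and_numbers; infer_instance

-- ===== CLAIM (what is proved, stated in full; the proofs are below) =====
def Claim_equal_add_space_between_letters_and_numbers : Prop := ∀ (string : String), Dom_add_space_between_letters_and_numbers string → Spec_add_space_between_letters_and_numbers string (add_space_between_letters_and_numbers string)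

-- ===== LEMMAS AND PROOFS =====

-- A's binary-search-based character tests agree with B's range tests on every ASCII char
set_option maxRecDepth 8192 in
lemma tests_eq_of_dom (c : Char) (h : pvDomChar c = true) :
    pvIsAlphaA c = (('A' ≤ c && c ≤ 'Z') || ('a' ≤ c && c ≤ 'z')) ∧
    pvIsNumericA c = ('0' ≤ c && c ≤ '9') := by
  have hlt : c.toNat < 127 := by
    simp [pvDomChar] at h
    omega
  have hc : Char.ofNat c.toNat = c := Char.ofNat_toNat c
  have key : ∀ n : Fin 127,
      pvIsAlphaA (Char.ofNat n.val) = (('A' ≤ Char.ofNat n.val && Char.ofNat n.val ≤ 'Z') || ('a' ≤ Char.ofNat n.val && Char.ofNat n.val ≤ 'z')) ∧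
      pvIsNumericA (Char.ofNat n.val) = ('0' ≤ Char.ofNat n.val && Char.ofNat n.val ≤ '9') := by decide
  have := key ⟨c.toNat, hlt⟩
  rwa [hc] at this

lemma boundary_eq (a b : Char) (ha : pvDomChar a = true) (hb : pvDomChar b = true) :
    ((pvIsAlphaA a && pvIsNumericA b) || (pvIsNumericA a && pvIsAlphaA b)) = pvBoundaryB a b := by
  obtain ⟨ha1, ha2⟩ := tests_eq_of_dom a ha
  obtain ⟨hb1, hb2⟩ := tests_eq_of_dom b hb
  simp [pvBoundaryB, ha1, ha2, hb1, hb2]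

-- the pairwise flatMap form of B on a nonempty character list
lemma addSpace_eq_flatMap (c : Char) (rest : List Char)
    (hdom : (c :: rest).all pvDomChar = true) :
    pvAddSpaceA (c :: rest) = c :: (List.zip (c :: rest) rest).flatMap
        (fun pc => if pvBoundaryB pc.1 pc.2 then [' ', pc.2] else [pc.2]) := by
  induction rest generalizing c with
  | nil => simp [pvAddSpaceA]
  | cons b t ih =>
    simp only [List.all_cons, Bool.and_eq_true] at hdom
    obtain ⟨ha, hb, ht⟩ := hdom
    have ihv := ih b (by simp [hb, ht])
    simp only [List.zip_cons_cons, List.flatMap_cons]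
    rw [pvAddSpaceA, boundary_eq c b ha hb]
    split
    · simp only [ihv]; rfl
    · simp only [ihv]; rfl

-- ===== VERDICT (by name: the statement is the Claim_ definition above) =====
theorem add_space_between_letters_and_numbers_spec : Claim_equal_add_space_between_letters_and_numbers := by
  intro s hdom
  unfold Spec_add_space_between_letters_and_numbers
  unfold Dom_add_space_between_letters_and_numbers pvDomStr at hdom
  unfold add_space_between_letters_and_numbers add_space_between_letters_and_numbers_alt
  cases hl : s.toList with
  | nil => rfl
  | cons c rest =>
    rw [addSpace_eq_flatMap c rest (by rw [hl] at hdom; exact hdom)]
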